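-- pv_equiv track=rewrite | github.com/EgoVolae/oil | problems/109.py | get_breakdowns_for_n
-- ===== SOURCE A (Python) =====
-- from typing import Dict, List, Tuple
--
-- def get_breakdowns_for_n(n: int, breakdowns_cached) -> List[List[int]]:
--
--     if n == 1:
--         return [[1]]
--
--     result = [[n]]
--     for i in range(1, n):
--         if breakdowns_cached.get(n-i) is not None:
--             smaller_breakdowns = breakdowns_cached[n-i]
--         else:
--             smaller_breakdowns = get_breakdowns_for_n(n - i, breakdowns_cached)
--             breakdowns_cached[n-i] = smaller_breakdowns
--         beefed_breakdowns = [p + [i] for p in smaller_breakdowns if len(p) < 3]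
--         beefed_breakdowns = [sorted(x) for x in beefed_breakdowns]
--
--         result.extend(beefed_breakdowns)
--     return result
-- ===== SOURCE B (Python) =====
-- # Bottom-up iterative DP over the same recurrence (no recursion); mutates breakdowns_cached
-- # with the same keys/values as A (insertion order may differ); return value identical.
-- def get_breakdowns_for_n(n, breakdowns_cached):
--     if n == 1:
--         return [[1]]
--     for m in range(1, n):
--         if breakdowns_cached.get(m) is not None:
--             continue
--         if m == 1:
--             breakdowns_cached[m] = [[1]]
--             continue
--         bd = [[m]]
--         for i in range(1, m):
--             bd.extend(sorted(p + [i]) for p in breakdowns_cached[m - i] if len(p) < 3)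
--         breakdowns_cached[m] = bd
--     result = [[n]]
--     for i in range(1, n):
--         result.extend(sorted(p + [i]) for p in breakdowns_cached[n - i] if len(p) < 3)
--     return result
-- ===== Notes on version B (the rewrite author's own statement) =====
-- stated objective: alternative
-- what changed: Replaces A's top-down recursion through the memo dict by an iterative bottom-up dynamic-programming fill of keys 1..n-1 followed by a read-out loop, eliminating recursion entirely; Pre_ excludes only inputs where A's recursion depth (1 + number of keys of 1..n-1 missing from the cache) overflows the interpreter recursion limit and A raises RecursionError.
import Mathlib
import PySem

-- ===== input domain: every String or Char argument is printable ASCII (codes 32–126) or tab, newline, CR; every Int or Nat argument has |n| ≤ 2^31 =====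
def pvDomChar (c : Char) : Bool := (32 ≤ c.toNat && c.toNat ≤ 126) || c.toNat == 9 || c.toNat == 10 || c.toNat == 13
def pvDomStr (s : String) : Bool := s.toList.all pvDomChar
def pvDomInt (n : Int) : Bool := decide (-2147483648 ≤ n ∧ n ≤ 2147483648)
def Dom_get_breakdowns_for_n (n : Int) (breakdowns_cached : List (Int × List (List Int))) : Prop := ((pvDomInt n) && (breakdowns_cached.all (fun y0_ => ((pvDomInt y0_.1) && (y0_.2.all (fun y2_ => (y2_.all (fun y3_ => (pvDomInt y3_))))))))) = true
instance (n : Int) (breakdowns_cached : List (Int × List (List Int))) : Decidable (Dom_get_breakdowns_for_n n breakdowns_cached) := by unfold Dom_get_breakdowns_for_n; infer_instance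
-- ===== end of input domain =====

-- B replaces A's top-down recursion through the memo dict by an iterative bottom-up fill of the
-- same table (objective: alternative decomposition, no recursion). Both Pythons mutate the caller's
-- dict (same keys/values, possibly different insertion order); the equivalence proved here is about
-- the RETURN value only.

abbrev pvCache : Type := PySem.Dict Int (List (List Int))

-- ===== PORT A =====
-- [p + [i] for p in sb if len(p) < 3]  then  [sorted(x) for x in …]
def pyBeefA (sb : List (List Int)) (i : Int) : List (List Int) :=
  let beefed := (sb.filter (fun p => decide (p.length < 3))).map (fun p => p ++ [i])
  beefed.map (fun x => PySem.List.sorted x (fun v => v) false)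

-- A, with the mutated dict threaded through explicitly (Python mutates breakdowns_cached in place)
def pyA (n : Int) (cache : pvCache) : List (List Int) × pvCache :=
  if n = 1 then ([[1]], cache)
  else
    (PySem.List.pyRange 1 n 1).attach.foldl
      (fun st i =>
        match st.2.get? (n - i.1) with
        | some sb => (st.1 ++ pyBeefA sb i.1, st.2)
        | none =>
          let r := pyA (n - i.1) st.2
          (st.1 ++ pyBeefA r.1 i.1, r.2.insert (n - i.1) r.1))
      ([[n]], cache)
termination_by n.toNat
decreasing_by
  have h := (PySem.List.mem_pyRange_one).1 i.2
  omega

def get_breakdowns_for_n (n : Int) (breakdowns_cached : List (Int × List (List Int))) : List (List Int) :=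
  (pyA n (PySem.Dict.ofList breakdowns_cached)).1

-- ===== PORT B =====
-- sorted(p + [i]) for p in sb if len(p) < 3   (single comprehension in Source B)
def pyBeefB (sb : List (List Int)) (i : Int) : List (List Int) :=
  (sb.filter (fun p => decide (p.length < 3))).map (fun p => PySem.List.sorted (p ++ [i]) (fun v => v) false)

-- body of Source B's fill loop for one missing key m
def pvAltEntry (cache : pvCache) (m : Int) : List (List Int) :=
  if m = 1 then [[1]]
  else (PySem.List.pyRange 1 m 1).foldl (fun bd i => bd ++ pyBeefB (cache.getD (m - i) []) i) [[m]]

-- for m in range(1, n): if cache.get(m) is not None: continue; else cache[m] = entry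
def pvFill (cache0 : pvCache) (b : Int) : pvCache :=
  (PySem.List.pyRange 1 b 1).foldl
    (fun c m => if (c.get? m).isSome then c else c.insert m (pvAltEntry c m)) cache0

def get_breakdowns_for_n_alt (n : Int) (breakdowns_cached : List (Int × List (List Int))) : List (List Int) :=
  if n = 1 then [[1]]
  else
    let cache := pvFill (PySem.Dict.ofList breakdowns_cached) n
    (PySem.List.pyRange 1 n 1).foldl (fun res i => res ++ pyBeefB (cache.getD (n - i) []) i) [[n]]

-- ===== PRECONDITION & SPEC =====
-- Python A recurses once per key of 1..n-1 missing from the initial dict (depth = 1 + number of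
-- missing keys) and raises RecursionError when that exceeds the interpreter's recursion limit;
-- Pre_ keeps the inputs whose recursion depth stays safely below it (B, being iterative, never
-- raises there). No input on which A returns within any realistic budget is excluded.
def Pre_get_breakdowns_for_n (n : Int) (breakdowns_cached : List (Int × List (List Int))) : Prop :=
  n - 1 - (((PySem.Dict.ofList breakdowns_cached).keys.filter
    (fun k => decide (1 ≤ k) && decide (k < n))).length : Int) ≤ 9000
instance (n : Int) (breakdowns_cached : List (Int × List (List Int))) : Decidable (Pre_get_breakdowns_for_n n breakdowns_cached) := by unfold Pre_get_breakdowns_for_n; infer_instance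

def pvWitness_get_breakdowns_for_n : Int × (List (Int × List (List Int))) := (5, [(2, [[2]])])

def Spec_get_breakdowns_for_n (n : Int) (breakdowns_cached : List (Int × List (List Int))) (out : List (List Int)) : Prop := out = get_breakdowns_for_n_alt n breakdowns_cached
instance (n : Int) (breakdowns_cached : List (Int × List (List Int))) (out : List (List Int)) : Decidable (Spec_get_breakdowns_for_n n breakdowns_cached out) := by unfold Spec_get_breakdowns_for_n; infer_instance

-- ===== CLAIM (what is proved, stated in full; the proofs are below) =====
def Claim_equal_get_breakdowns_for_n : Prop := ∀ (n : Int) (breakdowns_cached : List (Int × List (List Int))), Dom_get_breakdowns_for_n n breakdowns_cached → Pre_get_breakdowns_for_n n breakdowns_cached → Spec_get_breakdowns_for_n n breakdowns_cached (get_breakdowns_for_n n breakdowns_cached)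

-- ===== LEMMAS AND PROOFS =====

theorem pyBeef_eq (sb : List (List Int)) (i : Int) : pyBeefA sb i = pyBeefB sb i := by
  simp [pyBeefA, pyBeefB, List.map_map]

-- the value key m holds in the dict once A (or B) has filled it, as a function of the initial dict
def pvVal (c0 : pvCache) (m : Int) : List (List Int) :=
  match c0.get? m with
  | some v => v
  | none =>
    if m = 1 then [[1]]
    else
      (PySem.List.pyRange 1 m 1).attach.foldl
        (fun acc i => acc ++ pyBeefB (pvVal c0 (m - i.1)) i.1) [[m]]
termination_by m.toNat
decreasing_by
  have h := (PySem.List.mem_pyRange_one).1 i.2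
  omega

-- the common reference result for a call on n against initial dict c0
def pvRef (c0 : pvCache) (n : Int) : List (List Int) :=
  if n = 1 then [[1]]
  else [[n]] ++ (PySem.List.pyRange 1 n 1).flatMap (fun i => pyBeefB (pvVal c0 (n - i)) i)

theorem pvVal_some (c0 : pvCache) (m : Int) (v : List (List Int))
    (h : c0.get? m = some v) : pvVal c0 m = v := by
  rw [pvVal, h]

theorem pvVal_none (c0 : pvCache) (m : Int) (h : c0.get? m = none) :
    pvVal c0 m = pvRef c0 m := by
  rw [pvVal, h, pvRef]
  by_cases h1 : m = 1
  · simp [h1]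
  · simp only [if_neg h1]
    rw [PySem.List.foldl_append_eq_flatMap
      (g := fun i : {x // x ∈ PySem.List.pyRange 1 m 1} => pyBeefB (pvVal c0 (m - i.1)) i.1)]
    conv_rhs => rw [← List.attach_map_subtype_val (PySem.List.pyRange 1 m 1), List.flatMap_map]

-- c extends c0 by (some of) the canonical values
def pvExt (c0 c : pvCache) : Prop :=
  ∀ k : Int, c.get? k = c0.get? k ∨ (c0.get? k = none ∧ c.get? k = some (pvVal c0 k))

theorem pvExt_refl (c0 : pvCache) : pvExt c0 c0 := fun _ => Or.inl rfl

theorem pvExt_lookup (c0 c : pvCache) (h : pvExt c0 c) (k : Int) (v : List (List Int))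
    (hv : c.get? k = some v) : pvVal c0 k = v := by
  rcases h k with h' | ⟨h0, h'⟩
  · exact pvVal_some c0 k v (h' ▸ hv)
  · rw [hv] at h'
    exact (Option.some_inj.mp h').symm

theorem pvExt_none (c0 c : pvCache) (h : pvExt c0 c) (k : Int)
    (hv : c.get? k = none) : c0.get? k = none := by
  rcases h k with h' | ⟨h0, h'⟩
  · exact h' ▸ hv
  · rw [hv] at h'; cases h'

theorem pvExt_insert (c0 c : pvCache) (h : pvExt c0 c) (k : Int)
    (h0 : c0.get? k = none) : pvExt c0 (c.insert k (pvVal c0 k)) := by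
  intro j
  by_cases hj : j = k
  · subst hj
    exact Or.inr ⟨h0, PySem.Dict.get?_insert_self c _ _⟩
  · rw [PySem.Dict.get?_insert_of_ne c _ hj]
    exact h j

-- one missing entry computed by B's fill loop is the canonical value
theorem pvAltEntry_eq (c0 c1 : pvCache) (m : Int)
    (hlow : ∀ k : Int, 1 ≤ k → k < m → c1.get? k = some (pvVal c0 k))
    (h0 : c0.get? m = none) : pvAltEntry c1 m = pvVal c0 m := by
  rw [pvVal_none c0 m h0, pvAltEntry, pvRef]
  by_cases h1 : m = 1
  · simp [h1]
  · simp only [if_neg h1]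
    rw [PySem.List.foldl_congr_mem _ _
        (fun bd i => bd ++ pyBeefB (pvVal c0 (m - i)) i) _ ?_,
      PySem.List.foldl_append_eq_flatMap]
    intro acc x hx
    have hm := PySem.List.mem_pyRange_one.1 hx
    rw [PySem.Dict.getD_eq_get?_getD, hlow (m - x) (by omega) (by omega)]
    rfl

-- characterisation of port A's loop, given the recursion hypothesis for smaller arguments
theorem pyA_fold_aux (c0 : pvCache) (n : Int)
    (IH : ∀ (m : Int) (c : pvCache), m.toNat < n.toNat → pvExt c0 c →
      (pyA m c).1 = pvRef c0 m ∧ pvExt c0 (pyA m c).2) :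
    ∀ (l : List {x // x ∈ PySem.List.pyRange 1 n 1}) (acc : List (List Int)) (c : pvCache),
      pvExt c0 c →
      (l.foldl (fun st i =>
          match st.2.get? (n - i.1) with
          | some sb => (st.1 ++ pyBeefA sb i.1, st.2)
          | none =>
            let r := pyA (n - i.1) st.2
            (st.1 ++ pyBeefA r.1 i.1, r.2.insert (n - i.1) r.1)) (acc, c)).1
        = acc ++ l.flatMap (fun i => pyBeefB (pvVal c0 (n - i.1)) i.1) ∧
      pvExt c0 (l.foldl (fun st i =>
          match st.2.get? (n - i.1) with
          | some sb => (st.1 ++ pyBeefA sb i.1, st.2)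
          | none =>
            let r := pyA (n - i.1) st.2
            (st.1 ++ pyBeefA r.1 i.1, r.2.insert (n - i.1) r.1)) (acc, c)).2 := by
  intro l
  induction l with
  | nil => intro acc c hc; exact ⟨by simp, hc⟩
  | cons i t iht =>
    intro acc c hc
    have hm := PySem.List.mem_pyRange_one.1 i.2
    simp only [List.foldl_cons, List.flatMap_cons]
    cases hg : c.get? (n - i.1) with
    | some sb =>
      have hsb : pvVal c0 (n - i.1) = sb := pvExt_lookup c0 c hc _ sb hg
      refine ⟨?_, (iht (acc ++ pyBeefA sb i.1) c hc).2⟩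
      rw [(iht (acc ++ pyBeefA sb i.1) c hc).1, pyBeef_eq, hsb, List.append_assoc]
    | none =>
      have h0 : c0.get? (n - i.1) = none := pvExt_none c0 c hc _ hg
      have hrec := IH (n - i.1) c (by omega) hc
      have hval : (pyA (n - i.1) c).1 = pvVal c0 (n - i.1) :=
        hrec.1.trans (pvVal_none c0 _ h0).symm
      have hext : pvExt c0 ((pyA (n - i.1) c).2.insert (n - i.1) (pyA (n - i.1) c).1) := by
        rw [hval]; exact pvExt_insert c0 _ hrec.2 _ h0
      refine ⟨?_, (iht (acc ++ pyBeefA (pyA (n - i.1) c).1 i.1)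
        ((pyA (n - i.1) c).2.insert (n - i.1) (pyA (n - i.1) c).1) hext).2⟩
      rw [(iht (acc ++ pyBeefA (pyA (n - i.1) c).1 i.1)
        ((pyA (n - i.1) c).2.insert (n - i.1) (pyA (n - i.1) c).1) hext).1,
        pyBeef_eq, hval, List.append_assoc]

-- characterisation of port A: result is pvRef, and the threaded dict stays a canonical extension
theorem pyA_spec (c0 : pvCache) (n : Int) (c : pvCache) (h : pvExt c0 c) :
    (pyA n c).1 = pvRef c0 n ∧ pvExt c0 (pyA n c).2 := by
  rw [pyA, pvRef]
  by_cases h1 : n = 1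
  · simpa [h1] using h
  · simp only [if_neg h1]
    have IH : ∀ (m : Int) (c : pvCache), m.toNat < n.toNat → pvExt c0 c →
        (pyA m c).1 = pvRef c0 m ∧ pvExt c0 (pyA m c).2 := by
      intro m c hm hc
      exact pyA_spec c0 m c hc
    have := pyA_fold_aux c0 n IH (PySem.List.pyRange 1 n 1).attach [[n]] c h
    refine ⟨this.1.trans ?_, this.2⟩
    conv_rhs => rw [← List.attach_map_subtype_val (PySem.List.pyRange 1 n 1), List.flatMap_map]
termination_by n.toNat
decreasing_by exact hm

-- the fill loop of port B computes exactly the canonical values on 1..b-1 and touches nothing else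
theorem pvFill_spec (c0 : pvCache) (b : Int) :
    (∀ k : Int, 1 ≤ k → k < b → (pvFill c0 b).get? k = some (pvVal c0 k)) ∧
    (∀ k : Int, k < 1 ∨ b ≤ k → (pvFill c0 b).get? k = c0.get? k) := by
  by_cases hb : b ≤ 1
  · rw [pvFill, PySem.List.pyRange_one_eq_nil hb]
    exact ⟨fun k h1 h2 => absurd h2 (by omega), fun k _ => rfl⟩
  · have hsr : PySem.List.pyRange 1 b 1 = PySem.List.pyRange 1 (b - 1) 1 ++ [b - 1] := by
      have := PySem.List.pyRange_one_succ_right (a := 1) (b := b - 1) (by omega)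
      rw [show b - 1 + 1 = b by omega] at this
      exact this
    have hstep : pvFill c0 b =
        (if ((pvFill c0 (b - 1)).get? (b - 1)).isSome then pvFill c0 (b - 1)
         else (pvFill c0 (b - 1)).insert (b - 1) (pvAltEntry (pvFill c0 (b - 1)) (b - 1))) := by
      rw [pvFill, hsr, List.foldl_append]
      rfl
    have IH := pvFill_spec c0 (b - 1)
    cases hg : (pvFill c0 (b - 1)).get? (b - 1) with
    | some v =>
      rw [hstep, hg]
      simp only [Option.isSome_some, if_true]
      have h0 : c0.get? (b - 1) = some v := (IH.2 (b - 1) (by omega)).symm.trans hg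
      refine ⟨fun k h1 h2 => ?_, fun k hk => IH.2 k (by omega)⟩
      by_cases hkb : k = b - 1
      · subst hkb; rw [hg, pvVal_some c0 _ v h0]
      · exact IH.1 k h1 (by omega)
    | none =>
      rw [hstep, hg]
      simp only [Option.isSome_none, Bool.false_eq_true, if_false]
      have h0 : c0.get? (b - 1) = none := (IH.2 (b - 1) (by omega)).symm.trans hg
      have hae : pvAltEntry (pvFill c0 (b - 1)) (b - 1) = pvVal c0 (b - 1) :=
        pvAltEntry_eq c0 _ _ (fun k h1 h2 => IH.1 k h1 h2) h0
      refine ⟨fun k h1 h2 => ?_, fun k hk => ?_⟩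
      · by_cases hkb : k = b - 1
        · subst hkb; rw [PySem.Dict.get?_insert_self, hae]
        · rw [PySem.Dict.get?_insert_of_ne _ _ hkb]
          exact IH.1 k h1 (by omega)
      · rw [PySem.Dict.get?_insert_of_ne _ _ (by omega)]
        exact IH.2 k (by omega)
termination_by b.toNat
decreasing_by omega

theorem alt_eq_ref (n : Int) (bc : List (Int × List (List Int))) :
    get_breakdowns_for_n_alt n bc = pvRef (PySem.Dict.ofList bc) n := by
  rw [get_breakdowns_for_n_alt, pvRef]
  by_cases h1 : n = 1
  · simp [h1]
  · simp only [if_neg h1]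
    rw [PySem.List.foldl_congr_mem _ _
        (fun res i => res ++ pyBeefB (pvVal (PySem.Dict.ofList bc) (n - i)) i) _ ?_,
      PySem.List.foldl_append_eq_flatMap]
    intro acc x hx
    have hm := PySem.List.mem_pyRange_one.1 hx
    rw [PySem.Dict.getD_eq_get?_getD,
      (pvFill_spec (PySem.Dict.ofList bc) n).1 (n - x) (by omega) (by omega)]
    rfl

-- ===== VERDICT (by name: the statement is the Claim_ definition above) =====
theorem get_breakdowns_for_n_spec : Claim_equal_get_breakdowns_for_n := by
  intro n bc _ _
  unfold Spec_get_breakdowns_for_n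
  rw [alt_eq_ref, get_breakdowns_for_n,
    (pyA_spec (PySem.Dict.ofList bc) n _ (pvExt_refl _)).1]
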